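-- pv_equiv track=rewrite | github.com/jairoxyz/script.module.streamlink | resources/lib/streamlink/plugins/rtve.py | _get_alphabet
-- ===== SOURCE A (Python) =====
-- def _get_alphabet(text):
--     res = []
--     j = 0
--     k = 0
--     for char in text:
--         if k > 0:
--             k -= 1
--         else:
--             res.append(char)
--             j = (j + 1) % 4
--             k = j
--     return "".join(res)
-- ===== SOURCE B (Python) =====
-- def _get_alphabet(text):
--     # Jump directly between kept positions: index steps cycle through 2,3,4,1.
--     gaps = (2, 3, 4, 1)
--     res = []
--     i = 0
--     g = 0
--     n = len(text)
--     while i < n: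
--         res.append(text[i])
--         i += gaps[g]
--         g = (g + 1) % 4
--     return "".join(res)
-- ===== Notes on version B (the rewrite author's own statement) =====
-- stated objective: alternative
-- what changed: B precomputes the gap pattern between kept characters and jumps index-to-index over kept positions only, instead of scanning every character with a decrementing skip counter.
import Mathlib
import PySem

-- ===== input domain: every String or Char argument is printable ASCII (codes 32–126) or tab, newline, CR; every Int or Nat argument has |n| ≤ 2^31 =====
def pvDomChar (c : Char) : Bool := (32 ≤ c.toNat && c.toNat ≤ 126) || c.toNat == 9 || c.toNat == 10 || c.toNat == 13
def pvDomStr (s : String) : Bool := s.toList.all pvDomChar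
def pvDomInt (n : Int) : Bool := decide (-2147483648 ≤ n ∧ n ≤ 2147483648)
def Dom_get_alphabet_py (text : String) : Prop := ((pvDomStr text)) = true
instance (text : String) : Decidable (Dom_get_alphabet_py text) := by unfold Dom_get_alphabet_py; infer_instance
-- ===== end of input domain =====

-- B jumps index-to-index over kept positions via the precomputed gap cycle [2,3,4,1],
-- instead of A's per-character scan with a decrementing skip counter (alternative decomposition).


-- ===== PORT A =====
-- A's loop state: (res, j, k); each char either decrements the skip counter k
-- or is appended, with j cycling mod 4 and k reset to the new j.
def getAlphaStepA (st : List Char × Nat × Nat) (char : Char) : List Char × Nat × Nat :=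
  let (res, j, k) := st
  if k > 0 then (res, j, k - 1)
  else
    let j' := (j + 1) % 4
    (res ++ [char], j', j')

def get_alphabet_py (text : String) : String :=
  String.mk (text.toList.foldl getAlphaStepA ([], 0, 0)).1

-- ===== PORT B =====
-- the gap table (2, 3, 4, 1) indexed by the cycle position g (always < 4)
def getAlphaGap (g : Nat) : Nat :=
  match g with
  | 0 => 2
  | 1 => 3
  | 2 => 4
  | _ => 1

theorem getAlphaGap_pos (g : Nat) : 1 ≤ getAlphaGap g := by
  unfold getAlphaGap; split <;> omega

-- the while loop: take the char at the current index, jump forward by the gap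
-- (advancing i by gap = dropping gap elements of the remaining list)
def getAlphaJump : List Char → Nat → List Char
  | [], _ => []
  | c :: cs, g => c :: getAlphaJump ((c :: cs).drop (getAlphaGap g)) ((g + 1) % 4)
termination_by cs _ => cs.length
decreasing_by
  have := getAlphaGap_pos g
  simp [List.length_drop]
  omega

def get_alphabet_py_alt (text : String) : String :=
  String.mk (getAlphaJump text.toList 0)

-- ===== PRECONDITION & SPEC =====
def Spec_get_alphabet_py (text : String) (out : String) : Prop := out = get_alphabet_py_alt text
instance (text : String) (out : String) : Decidable (Spec_get_alphabet_py text out) := by unfold Spec_get_alphabet_py; infer_instance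

-- ===== CLAIM (what is proved, stated in full; the proofs are below) =====
def Claim_equal_get_alphabet_py : Prop := ∀ (text : String), Dom_get_alphabet_py text → Spec_get_alphabet_py text (get_alphabet_py text)

-- ===== LEMMAS AND PROOFS =====

-- skipping k chars with the counter = folding over the list with k dropped (result component)
theorem foldA_skip (cs : List Char) (k : Nat) (res : List Char) (j : Nat) :
    (cs.foldl getAlphaStepA (res, j, k)).1 = ((cs.drop k).foldl getAlphaStepA (res, j, 0)).1 := by
  induction cs generalizing k with
  | nil => simp
  | cons c cs ih =>
    cases k with
    | zero => simp
    | succ k' =>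
      simp only [List.foldl_cons, List.drop_succ_cons]
      have hstep : getAlphaStepA (res, j, k' + 1) c = (res, j, k') := by
        simp [getAlphaStepA]
      rw [hstep, ih]

-- main invariant: starting a "take" with counter 0 and cycle position j < 4,
-- A's fold appends exactly what B's jump loop collects from the remaining list.
theorem foldA_eq_jump (n : ℕ) (cs : List Char) (hn : cs.length ≤ n) (res : List Char) (j : Nat)
    (hj : j < 4) :
    (cs.foldl getAlphaStepA (res, j, 0)).1 = res ++ getAlphaJump cs j := by
  induction n generalizing cs res j with
  | zero =>
    have : cs = [] := List.eq_nil_of_length_eq_zero (Nat.le_zero.mp hn)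
    subst this; simp [getAlphaJump]
  | succ n ih =>
    cases cs with
    | nil => simp [getAlphaJump]
    | cons c cs' =>
      have hstep : getAlphaStepA (res, j, 0) c = (res ++ [c], (j + 1) % 4, (j + 1) % 4) := by
        simp [getAlphaStepA]
      have hgap : getAlphaGap j = (j + 1) % 4 + 1 := by
        interval_cases j <;> rfl
      rw [List.foldl_cons, hstep, foldA_skip, getAlphaJump, hgap]
      simp only [List.drop_succ_cons]
      have hlen : (cs'.drop ((j + 1) % 4)).length ≤ n := by
        have := @List.length_drop Char ((j + 1) % 4) cs'
        simp at hn
        omega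
      rw [ih _ hlen _ _ (Nat.mod_lt _ (by omega))]
      simp

-- ===== VERDICT (by name: the statement is the Claim_ definition above) =====
theorem get_alphabet_py_spec : Claim_equal_get_alphabet_py := by
  intro text _
  unfold Spec_get_alphabet_py get_alphabet_py get_alphabet_py_alt
  rw [foldA_eq_jump text.toList.length text.toList le_rfl [] 0 (by omega)]
  simp
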